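-- pv_equiv track=rewrite | github.com/graknol/ifs-cloud-core-mcp-server | supervised_training_loop.py | extract_file_header
-- ===== SOURCE A (Python) =====
-- def extract_file_header(content: str) -> str:
--     """Extract header comments from file."""
--     lines = content.split('\n')
--     header_lines = []
--
--     for line in lines:
--         stripped = line.strip()
--         if stripped.startswith('--') or stripped.startswith('/*') or stripped.startswith('*'):
--             header_lines.append(line)
--         elif stripped and not stripped.startswith('--'):
--             break
--
--     return '\n'.join(header_lines[:20])  # First 20 header lines
-- ===== SOURCE B (Python) =====
-- def extract_file_header(content: str) -> str:
--     """Extract header comments from file."""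
--     lines = content.split('\n')
--     def soft(line):
--         s = line.strip()
--         return s == '' or s.startswith(('--', '/*', '*'))
--     stop = next((i for i, line in enumerate(lines) if not soft(line)), len(lines))
--     header = [line for line in lines[:stop]
--               if line.strip().startswith(('--', '/*', '*'))]
--     return '\n'.join(header[:20])
-- ===== Notes on version B (the rewrite author's own statement) =====
-- stated objective: alternative
-- what changed: Replaces the single walk-and-break loop with a two-phase computation: find the first disqualifying line's index (takewhile prefix), then filter that prefix for comment lines and cap at 20.
import Mathlib
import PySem

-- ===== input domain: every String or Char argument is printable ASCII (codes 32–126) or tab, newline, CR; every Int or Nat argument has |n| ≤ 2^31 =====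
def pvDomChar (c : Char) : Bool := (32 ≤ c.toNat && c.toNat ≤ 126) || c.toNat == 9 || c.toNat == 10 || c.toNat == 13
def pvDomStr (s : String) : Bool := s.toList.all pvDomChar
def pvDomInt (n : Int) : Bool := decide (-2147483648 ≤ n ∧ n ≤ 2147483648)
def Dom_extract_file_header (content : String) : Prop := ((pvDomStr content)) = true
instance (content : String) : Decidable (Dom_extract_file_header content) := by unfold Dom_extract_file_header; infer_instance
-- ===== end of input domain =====

-- B replaces A's walk-and-break loop by a two-phase computation (stop index, then filter + cap); same result, same cost (objective: alternative).

-- ===== PORT A =====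
-- the loop with break: structural recursion over the lines, same branch order as A
def pvALoop : List String → List String
  | [] => []
  | line :: rest =>
    if PySem.Str.startswith (PySem.Str.strip line) "--"
        || PySem.Str.startswith (PySem.Str.strip line) "/*"
        || PySem.Str.startswith (PySem.Str.strip line) "*" then
      line :: pvALoop rest
    else if (PySem.Str.strip line != "")
        && !PySem.Str.startswith (PySem.Str.strip line) "--" then
      []  -- break
    else
      pvALoop rest

def extract_file_header (content : String) : String :=
  let lines := (PySem.Str.split? content "\n").getD []  -- split? is some for nonempty sep
  let header_lines := pvALoop lines
  PySem.Str.join "\n" (header_lines.take 20)  -- header_lines[:20] (nonnegative bound = take)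

-- ===== PORT B =====
def pvBHdr (line : String) : Bool :=
  PySem.Str.startswith (PySem.Str.strip line) "--"
    || PySem.Str.startswith (PySem.Str.strip line) "/*"
    || PySem.Str.startswith (PySem.Str.strip line) "*"

def pvBSoft (line : String) : Bool :=
  PySem.Str.strip line == ""
    || PySem.Str.startswith (PySem.Str.strip line) "--"
    || PySem.Str.startswith (PySem.Str.strip line) "/*"
    || PySem.Str.startswith (PySem.Str.strip line) "*"

def extract_file_header_alt (content : String) : String :=
  let lines := (PySem.Str.split? content "\n").getD []
  -- next((i for i, line in enumerate(lines) if not soft(line)), len(lines))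
  let stop := (lines.findIdx? (fun l => !pvBSoft l)).getD lines.length
  let header := (lines.take stop).filter pvBHdr
  PySem.Str.join "\n" (header.take 20)

-- ===== PRECONDITION & SPEC =====
def Spec_extract_file_header (content : String) (out : String) : Prop := out = extract_file_header_alt content
instance (content : String) (out : String) : Decidable (Spec_extract_file_header content out) := by unfold Spec_extract_file_header; infer_instance

-- ===== CLAIM (what is proved, stated in full; the proofs are below) =====
def Claim_equal_extract_file_header : Prop := ∀ (content : String), Dom_extract_file_header content → Spec_extract_file_header content (extract_file_header content)

-- ===== LEMMAS AND PROOFS =====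
theorem pvALoop_cons (l : String) (rest : List String) :
    pvALoop (l :: rest)
      = if pvBHdr l then l :: pvALoop rest
        else if (PySem.Str.strip l != "")
            && !PySem.Str.startswith (PySem.Str.strip l) "--" then []
        else pvALoop rest := rfl

theorem pvBSoft_eq (l : String) :
    pvBSoft l = ((PySem.Str.strip l == "") || pvBHdr l) := by
  simp only [pvBSoft, pvBHdr, Bool.or_assoc]

theorem pv_phase_eq (ls : List String) :
    (ls.take ((ls.findIdx? (fun l => !pvBSoft l)).getD ls.length)).filter pvBHdr
      = pvALoop ls := by
  induction ls with
  | nil => rfl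
  | cons l rest ih =>
    rw [List.findIdx?_cons, pvALoop_cons]
    cases hs : pvBSoft l with
    | false =>
      have hs' := hs
      rw [pvBSoft_eq, Bool.or_eq_false_iff] at hs'
      obtain ⟨hE, hh⟩ := hs'
      have h1 : PySem.Str.startswith (PySem.Str.strip l) "--" = false := by
        rw [pvBHdr, Bool.or_eq_false_iff, Bool.or_eq_false_iff] at hh
        exact hh.1.1
      simp only [Bool.not_false, if_true, Option.getD_some, List.take_zero,
        List.filter_nil, hh, if_false, bne, hE, h1, Bool.and_self,
        if_true, Bool.false_eq_true]
    | true =>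
      rw [if_neg (by simp)]
      have hgetD : (Option.map (· + 1) (List.findIdx? (fun l => !pvBSoft l) rest)).getD
            (l :: rest).length
          = (List.findIdx? (fun l => !pvBSoft l) rest).getD rest.length + 1 := by
        cases List.findIdx? (fun l => !pvBSoft l) rest <;> simp
      rw [hgetD, List.take_succ_cons, List.filter_cons]
      cases hh : pvBHdr l with
      | true => rw [if_pos rfl, if_pos rfl, ih]
      | false =>
        have hE : (PySem.Str.strip l == "") = true := by
          rw [pvBSoft_eq, hh, Bool.or_false] at hs
          exact hs
        rw [if_neg (by simp), if_neg (by simp),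
          if_neg (by simp [bne, hE]), ih]

-- ===== VERDICT (by name: the statement is the Claim_ definition above) =====
theorem extract_file_header_spec : Claim_equal_extract_file_header := by
  intro content _
  show PySem.Str.join "\n" ((pvALoop ((PySem.Str.split? content "\n").getD [])).take 20)
      = extract_file_header_alt content
  show _ = PySem.Str.join "\n"
      ((((PySem.Str.split? content "\n").getD []).take
          ((((PySem.Str.split? content "\n").getD []).findIdx? (fun l => !pvBSoft l)).getD
            ((PySem.Str.split? content "\n").getD []).length)).filter pvBHdr |>.take 20)
  rw [pv_phase_eq]
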